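-- pv_equiv track=rewrite | github.com/icarus0309/Library-Management-System | admFunc/SortFunc.py | sameAutSort
-- ===== SOURCE A (Python) =====
-- def sameAutSort(allbook): #以后尝试用哈希表改进这里
--     allauthor = [row[1] for row in allbook] #数据表的第二列存储作者信息
--     newallbook = [] #newallbook是用来存储排序完毕的书籍信息表
--     tmp = allbook.copy() #深拷贝（我闲的）
--     for i in allauthor:
--         idx = [] #用来存储相同作者书籍的下标
--         for j in range(len(tmp)): #遍历表中所有的作者
--             if tmp[j][1]==i:
--                 idx.append(j) #作者相同，idx存储+1
--         for j in range(len(idx)):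
--             newallbook.append(tmp[idx[j]]) #将当前作者的全部书籍写入newallbook
--         #接下来，从tmp里清除掉已经录入newallbook的作者
--         delcount = 0 #每删除一次，元素下标就要往前缩进一位，因此用delcount表缩进次数
--         for j in idx:
--             if tmp[j-delcount][1] == i: #当前位置上的作者是否等于要找的作者
--                 tmp.remove(tmp[j-delcount]) #清除操作
--                 delcount += 1
--     return newallbook
-- ===== SOURCE B (Python) =====
-- def sameAutSort(allbook):
--     groups = {}
--     for row in allbook:
--         groups.setdefault(row[1], []).append(row)
--     return [row for rows in groups.values() for row in rows]
-- ===== Notes on version B (the rewrite author's own statement) =====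
-- stated objective: idiomatic
-- what changed: Replaced A's nested scan-and-delete grouping (for each author, re-scan tmp for matching indices, copy the rows out, then delete them with a delcount-shifted remove) by a single pass that appends each row to a per-author dict group via setdefault, returning the groups concatenated in first-occurrence order.
import Mathlib
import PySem

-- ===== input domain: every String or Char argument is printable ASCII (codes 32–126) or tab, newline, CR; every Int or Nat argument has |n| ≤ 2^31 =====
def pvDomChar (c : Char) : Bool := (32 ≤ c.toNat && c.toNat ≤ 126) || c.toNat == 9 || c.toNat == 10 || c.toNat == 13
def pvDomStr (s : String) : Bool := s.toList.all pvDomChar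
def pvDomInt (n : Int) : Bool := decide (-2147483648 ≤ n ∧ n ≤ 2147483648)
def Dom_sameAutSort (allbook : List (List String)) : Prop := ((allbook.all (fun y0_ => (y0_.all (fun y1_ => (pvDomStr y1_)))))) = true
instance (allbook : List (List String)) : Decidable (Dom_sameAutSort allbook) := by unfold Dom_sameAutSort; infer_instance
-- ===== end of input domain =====

-- B replaces A's scan-and-delete grouping (re-scan, copy out, delete with a shifted index)
-- by a single-pass dict of per-author row groups, concatenated in first-occurrence order.

-- row[1], the author column (the one lookup both ports share; Pre_ keeps it in range)
def rowAut (row : List String) : String := (PySem.List.pyGet? row 1).getD ""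

-- ===== PORT A =====
-- body of A's removal loop: 'if tmp[j-delcount][1]==i: tmp.remove(tmp[j-delcount]); delcount += 1'
def remStep (i : String) (s : List (List String) × Int) (j : Int) :
    List (List String) × Int :=
  let x := PySem.List.pyGetD s.1 (j - s.2) []
  if rowAut x == i then ((PySem.List.remove? s.1 x).getD s.1, s.2 + 1) else s

-- one outer iteration: the three inner loops of A over (newallbook, tmp) for author i
def stepA (st : List (List String) × List (List String)) (i : String) :
    List (List String) × List (List String) :=
  let newallbook := st.1
  let tmp := st.2
  -- idx = []; for j in range(len(tmp)): if tmp[j][1]==i: idx.append(j)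
  let idx : List Int :=
    (PySem.List.pyRange 0 (tmp.length : Int) 1).foldl
      (fun (idx : List Int) j =>
        if rowAut (PySem.List.pyGetD tmp j []) == i then idx ++ [j] else idx) []
  -- for j in range(len(idx)): newallbook.append(tmp[idx[j]])
  let newallbook :=
    (PySem.List.pyRange 0 (idx.length : Int) 1).foldl
      (fun nb j => nb ++ [PySem.List.pyGetD tmp (PySem.List.pyGetD idx j 0) []]) newallbook
  -- delcount = 0; for j in idx: if tmp[j-delcount][1]==i: tmp.remove(tmp[j-delcount]); delcount += 1
  let fin := idx.foldl (remStep i) (tmp, 0)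
  (newallbook, fin.1)

def sameAutSort (allbook : List (List String)) : List (List String) :=
  -- allauthor = [row[1] for row in allbook]
  let allauthor := allbook.map (fun row => rowAut row)
  -- newallbook = []; tmp = allbook.copy(); for i in allauthor: …  ; return newallbook
  (allauthor.foldl stepA ([], allbook)).1

-- ===== PORT B =====
def sameAutSort_alt (allbook : List (List String)) : List (List String) :=
  -- groups = {}; for row in allbook: groups.setdefault(row[1], []).append(row)
  let groups : PySem.Dict String (List (List String)) :=
    allbook.foldl (fun d row => d.modify (rowAut row) [] (fun g => g ++ [row])) PySem.Dict.empty
  -- [row for rows in groups.values() for row in rows]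
  groups.values.flatten

-- ===== PRECONDITION & SPEC =====
-- Pre_ excludes exactly the inputs on which the Python A raises IndexError (a row with
-- fewer than two fields, so row[1] fails); B raises there too.
def Pre_sameAutSort (allbook : List (List String)) : Prop :=
  ∀ row ∈ allbook, 2 ≤ row.length
instance (allbook : List (List String)) : Decidable (Pre_sameAutSort allbook) := by
  unfold Pre_sameAutSort; infer_instance
def pvWitness_sameAutSort : List (List String) :=
  [["1", "alice"], ["2", "bob"], ["3", "alice"]]

def Spec_sameAutSort (allbook : List (List String)) (out : List (List String)) : Prop := out = sameAutSort_alt allbook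
instance (allbook : List (List String)) (out : List (List String)) : Decidable (Spec_sameAutSort allbook out) := by unfold Spec_sameAutSort; infer_instance

-- ===== CLAIM (what is proved, stated in full; the proofs are below) =====
def Claim_equal_sameAutSort : Prop := ∀ (allbook : List (List String)), Dom_sameAutSort allbook → Pre_sameAutSort allbook → Spec_sameAutSort allbook (sameAutSort allbook)

-- ===== LEMMAS AND PROOFS =====

-- canonical grouping: for each author in first-occurrence order, all of its rows in order
def grp (l : List (List String)) : List (List String) :=
  match l with
  | [] => []
  | r :: t =>
      (r :: t).filter (fun x => rowAut x == rowAut r) ++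
        grp (t.filter (fun x => !(rowAut x == rowAut r)))
termination_by l.length
decreasing_by
  simp
  exact le_trans (List.length_filter_le _ _) (by simp)

-- the indices A's first inner loop collects
def idxL (tmp : List (List String)) (i : String) : List Int :=
  (PySem.List.pyRange 0 (tmp.length : Int) 1).filter
    (fun j => rowAut (PySem.List.pyGetD tmp j []) == i)

lemma pyGetD_cons_of_one_le (r : List String) (t : List (List String)) (m : Int)
    (h : 1 ≤ m) : PySem.List.pyGetD (r :: t) m [] = PySem.List.pyGetD t (m - 1) [] := by
  obtain ⟨n, rfl⟩ : ∃ n : Nat, m = (n : Int) + 1 := ⟨(m - 1).toNat, by omega⟩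
  have h1 : ((n : Int) + 1) = ((n + 1 : Nat) : Int) := by push_cast; ring
  rw [h1, PySem.List.pyGetD_natCast]
  simp [PySem.List.pyGetD_natCast]

lemma idxL_nonneg (tmp : List (List String)) (i : String) :
    ∀ j ∈ idxL tmp i, 0 ≤ j := by
  intro j hj
  have := (List.mem_filter.mp hj).1
  exact (PySem.List.mem_pyRange_one.mp this).1

lemma idxL_pairwise (tmp : List (List String)) (i : String) :
    (idxL tmp i).Pairwise (· < ·) := by
  apply List.Pairwise.filter
  rw [PySem.List.pyRange_zero_natCast]
  exact (List.pairwise_lt_range).map _ (by intro a b hab; exact_mod_cast hab)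

lemma idxL_map_getD (tmp : List (List String)) (i : String) :
    (idxL tmp i).map (fun j => PySem.List.pyGetD tmp j []) =
      tmp.filter (fun x => rowAut x == i) := by
  unfold idxL
  rw [show (fun j => rowAut (PySem.List.pyGetD tmp j []) == i) =
      ((fun x => rowAut x == i) ∘ (fun j => PySem.List.pyGetD tmp j [])) from rfl,
    ← List.filter_map]
  rw [show PySem.List.pyRange 0 ((tmp.length : Int)) 1
      = PySem.List.pyRange 0 (PySem.List.len tmp) 1 from by simp [PySem.List.len]]
  rw [PySem.List.map_pyGetD_pyRange_zero]

lemma idxL_cons (r : List String) (t : List (List String)) (i : String) :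
    idxL (r :: t) i =
      (if rowAut r == i then [(0 : Int)] else []) ++ (idxL t i).map (· + 1) := by
  unfold idxL
  have h1 : ((r :: t).length : Int) = ((t.length + 1 : Nat) : Int) := by simp
  rw [h1, PySem.List.pyRange_zero_natCast, PySem.List.pyRange_zero_natCast,
    List.range_succ_eq_map]
  have h2 : List.map (fun k : Nat => (k : Int)) (List.map Nat.succ (List.range t.length))
      = List.map (fun j : Int => j + 1) (List.map (fun k : Nat => (k : Int)) (List.range t.length)) := by
    simp only [List.map_map]
    apply List.map_congr_left
    intro k _
    simp only [Function.comp]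
    push_cast
    ring
  simp only [List.map_cons, h2, List.filter_cons]
  rw [List.filter_map]
  have h3 : List.filter ((fun j => rowAut (PySem.List.pyGetD (r :: t) j []) == i) ∘ fun j : Int => j + 1)
        (List.map (fun k : Nat => (k : Int)) (List.range t.length))
      = List.filter (fun j => rowAut (PySem.List.pyGetD t j []) == i)
        (List.map (fun k : Nat => (k : Int)) (List.range t.length)) := by
    apply List.filter_congr
    intro j hj
    obtain ⟨k, _, rfl⟩ := List.mem_map.mp hj
    simp only [Function.comp]
    rw [pyGetD_cons_of_one_le _ _ _ (by omega)]
    simp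
  rw [h3]
  have h0 : PySem.List.pyGetD (r :: t) ((0 : Nat) : Int) [] = r := by
    simp [PySem.List.pyGetD_zero_cons]
  rw [h0]
  split <;> simp

-- the removal loop skips a head whose author is not i
lemma remFold_cons (i : String) (r : List String) :
    ∀ (js : List Int) (t : List (List String)) (d : Int), rowAut r ≠ i →
      (∀ j ∈ js, d + 1 ≤ j) → js.Pairwise (· < ·) →
      (js.foldl (remStep i) (r :: t, d)).1 = r :: (js.foldl (remStep i) (t, d + 1)).1 := by
  intro js
  induction js with
  | nil => intro t d _ _ _; simp
  | cons j rest ih =>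
    intro t d hr hge hpw
    have hj : d + 1 ≤ j := hge j (by simp)
    simp only [List.foldl_cons]
    have hx : PySem.List.pyGetD (r :: t) (j - d) [] = PySem.List.pyGetD t (j - (d + 1)) [] := by
      rw [pyGetD_cons_of_one_le _ _ _ (by omega)]
      ring_nf
    have hrest : ∀ j' ∈ rest, (d + 1) + 1 ≤ j' := by
      intro j' hj'
      have := (List.pairwise_cons.mp hpw).1 j' hj'
      omega
    have hpw' := (List.pairwise_cons.mp hpw).2
    by_cases hc : rowAut (PySem.List.pyGetD t (j - (d + 1)) []) == i
    · have hne : r ≠ PySem.List.pyGetD t (j - (d + 1)) [] := by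
        intro he; apply hr; rw [he]; exact eq_of_beq hc
      have hrem : (PySem.List.remove? (r :: t) (PySem.List.pyGetD t (j - (d+1)) [])).getD (r :: t)
          = r :: (PySem.List.remove? t (PySem.List.pyGetD t (j - (d+1)) [])).getD t := by
        rw [PySem.List.remove?_cons_of_ne _ hne]
        cases PySem.List.remove? t (PySem.List.pyGetD t (j - (d+1)) []) <;> simp
      simp only [remStep, hx, hc, if_pos, hrem]
      exact ih _ _ hr (by intro j' h; have := hrest j' h; omega) hpw'
    · simp only [remStep, hx, hc]
      simp only [Bool.false_eq_true, if_false]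
      exact ih _ _ hr (by intro j' h; have := hrest j' h; omega) hpw'

-- the removal loop deletes exactly the rows with author i
lemma remFold_idxL (i : String) :
    ∀ (t : List (List String)) (d : Int),
      (((idxL t i).map (· + d)).foldl (remStep i) (t, d)).1 =
        t.filter (fun x => !(rowAut x == i)) := by
  intro t
  induction t with
  | nil => intro d; simp [idxL]
  | cons r t ih =>
    intro d
    rw [idxL_cons]
    have hmap : ∀ d' : Int, ((idxL t i).map (· + 1)).map (· + d')
        = (idxL t i).map (· + (d' + 1)) := by
      intro d'
      rw [List.map_map]
      apply List.map_congr_left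
      intro k _
      simp only [Function.comp]
      ring
    by_cases hr : rowAut r == i
    · simp only [hr, if_pos, List.singleton_append, List.map_cons, List.foldl_cons]
      have hstep : remStep i (r :: t, d) (0 + d) = (t, d + 1) := by
        simp only [remStep]
        have h0 : (0 : Int) + d - d = 0 := by ring
        rw [h0]
        have hg : PySem.List.pyGetD (r :: t) (0 : Int) [] = r := by
          simp [PySem.List.pyGetD_zero_cons]
        simp only [hg, hr, if_pos, PySem.List.remove?_cons_self]
        simp
      rw [hstep, hmap, ih]
      simp [hr]
    · have hrne : rowAut r ≠ i := by
        intro he; rw [he] at hr; simp at hr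
      simp only [hr, Bool.false_eq_true, if_false, List.nil_append, hmap]
      have hbound : ∀ j ∈ (idxL t i).map (· + (d + 1)), d + 1 ≤ j := by
        intro j hj
        obtain ⟨k, hk, rfl⟩ := List.mem_map.mp hj
        have := idxL_nonneg t i k hk
        omega
      have hpw : ((idxL t i).map (· + (d + 1))).Pairwise (· < ·) := by
        refine List.Pairwise.map _ ?_ (idxL_pairwise t i)
        intro a b hab
        omega
      rw [remFold_cons i r _ t d hrne hbound hpw, ih]
      simp [hr]

-- one outer iteration of A, characterised
lemma stepA_char (newb tmp : List (List String)) (i : String) :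
    stepA (newb, tmp) i =
      (newb ++ tmp.filter (fun x => rowAut x == i),
        tmp.filter (fun x => !(rowAut x == i))) := by
  have hidx : (PySem.List.pyRange 0 (tmp.length : Int) 1).foldl
      (fun (idx : List Int) j =>
        if rowAut (PySem.List.pyGetD tmp j []) == i then idx ++ [j] else idx) []
      = idxL tmp i := by
    rw [PySem.List.foldl_append_if_eq_filter]
    simp [idxL]
  simp only [stepA, hidx]
  rw [PySem.List.foldl_pyRange_zero_pyGetD' (idxL tmp i) 0
      (fun nb v => nb ++ [PySem.List.pyGetD tmp v []]) newb]
  rw [PySem.List.foldl_append_singleton_eq_map, idxL_map_getD]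
  rw [show idxL tmp i = (idxL tmp i).map (· + (0 : Int)) from by simp]
  rw [remFold_idxL i tmp 0]

-- A's outer loop computes grp
lemma foldA_grp :
    ∀ (l : List (List String)) (S : List String) (newb : List (List String)),
      ((l.map (fun row => rowAut row)).foldl stepA
          (newb, l.filter (fun x => !(S.contains (rowAut x))))).1 =
        newb ++ grp (l.filter (fun x => !(S.contains (rowAut x)))) := by
  intro l
  induction l with
  | nil => intro S newb; simp [grp]
  | cons r t ih =>
    intro S newb
    by_cases hS : S.contains (rowAut r)
    · have hSm : rowAut r ∈ S := by simpa using hS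
      have hfc : (r :: t).filter (fun x => !(S.contains (rowAut x)))
          = t.filter (fun x => !(S.contains (rowAut x))) := by
        simp [hSm]
      rw [hfc]
      simp only [List.map_cons, List.foldl_cons, stepA_char]
      have h1 : (t.filter (fun x => !(S.contains (rowAut x)))).filter
          (fun x => rowAut x == rowAut r) = [] := by
        rw [List.filter_eq_nil_iff]
        intro x hx
        have hx2 := (List.mem_filter.mp hx).2
        intro hc
        rw [eq_of_beq hc] at hx2
        simp [hSm] at hx2
      have h2 : (t.filter (fun x => !(S.contains (rowAut x)))).filter
          (fun x => !(rowAut x == rowAut r)) = t.filter (fun x => !(S.contains (rowAut x))) := by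
        rw [List.filter_eq_self]
        intro x hx
        have hx2 := (List.mem_filter.mp hx).2
        simp only [Bool.not_eq_eq_eq_not, Bool.not_true, beq_eq_false_iff_ne]
        intro hc
        rw [hc] at hx2
        simp [hSm] at hx2
      rw [h1, h2, List.append_nil]
      exact ih S newb
    · have hSm : rowAut r ∉ S := by simpa using hS
      have hfc : (r :: t).filter (fun x => !(S.contains (rowAut x)))
          = r :: t.filter (fun x => !(S.contains (rowAut x))) := by
        simp [hSm]
      rw [hfc]
      simp only [List.map_cons, List.foldl_cons, stepA_char]
      have hS' : ∀ x : List String,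
          (!((rowAut r :: S).contains (rowAut x)))
            = (!(S.contains (rowAut x)) && !(rowAut x == rowAut r)) := by
        intro x
        by_cases h1 : rowAut x = rowAut r <;>
          by_cases h2 : S.contains (rowAut x) <;>
            simp_all
      have htmp : (r :: t.filter (fun x => !(S.contains (rowAut x)))).filter
            (fun x => !(rowAut x == rowAut r))
          = t.filter (fun x => !((rowAut r :: S).contains (rowAut x))) := by
        rw [List.filter_cons]
        simp only [beq_self_eq_true, Bool.not_true, Bool.false_eq_true, if_false]
        rw [List.filter_filter]
        apply List.filter_congr
        intro x _
        rw [hS' x, Bool.and_comm]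
      rw [htmp]
      have := ih (rowAut r :: S)
        (newb ++ (r :: t.filter (fun x => !(S.contains (rowAut x)))).filter
          (fun x => rowAut x == rowAut r))
      rw [this]
      have hgrp : grp (r :: t.filter (fun x => !(S.contains (rowAut x))))
          = (r :: t.filter (fun x => !(S.contains (rowAut x)))).filter
              (fun x => rowAut x == rowAut r) ++
            grp ((t.filter (fun x => !(S.contains (rowAut x)))).filter
              (fun x => !(rowAut x == rowAut r))) := by
        rw [grp]
      have htmp2 : (t.filter (fun x => !(S.contains (rowAut x)))).filter
            (fun x => !(rowAut x == rowAut r))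
          = t.filter (fun x => !((rowAut r :: S).contains (rowAut x))) := by
        rw [List.filter_filter]
        apply List.filter_congr
        intro x _
        rw [hS' x, Bool.and_comm]
      rw [hgrp, htmp2, List.append_assoc]

lemma A_eq_grp (allbook : List (List String)) : sameAutSort allbook = grp allbook := by
  have hfilt : allbook.filter (fun x => !(([] : List String).contains (rowAut x)))
      = allbook := by simp
  have h := foldA_grp allbook [] []
  rw [hfilt] at h
  show (List.foldl stepA ([], allbook) (allbook.map (fun row => rowAut row))).1 = grp allbook
  simpa using h

lemma discard_ofList (xs : List String) (x : String) :
    (PySem.Set.ofList xs).discard x = PySem.Set.ofList (xs.filter (fun y => !(y == x))) := by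
  induction xs with
  | nil => rfl
  | cons y xs ih =>
    rw [PySem.Set.ofList_cons, List.filter_cons]
    by_cases hyx : y == x
    · have hy : y = x := eq_of_beq hyx
      simp only [hyx, Bool.not_true, Bool.false_eq_true, if_false]
      show List.filter (fun z => !(z == x)) (y :: PySem.Set.discard (PySem.Set.ofList xs) y) = _
      rw [List.filter_cons]
      simp only [hyx, Bool.not_true, Bool.false_eq_true, if_false]
      show List.filter _ (List.filter _ _) = _
      rw [hy, List.filter_filter, ← ih]
      show _ = List.filter (fun z => !(z == x)) (PySem.Set.ofList xs)
      apply List.filter_congr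
      intro z _
      cases h : z == x <;> simp
    · simp only [hyx, Bool.not_false, if_true]
      rw [PySem.Set.ofList_cons]
      show List.filter (fun z => !(z == x)) (y :: List.filter (fun z => !(z == y)) (PySem.Set.ofList xs))
          = y :: List.filter (fun z => !(z == y)) (PySem.Set.ofList (xs.filter (fun z => !(z == x))))
      rw [List.filter_cons]
      simp only [hyx, Bool.not_false, if_true]
      rw [← ih]
      show _ = y :: List.filter (fun z => !(z == y))
          (List.filter (fun z => !(z == x)) (PySem.Set.ofList xs))
      rw [List.filter_filter, List.filter_filter]
      congr 1
      apply List.filter_congr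
      intro z _
      rw [Bool.and_comm]

lemma flatMap_dedup_grp :
    ∀ (l : List (List String)),
      (PySem.List.dedup (l.map (fun row => rowAut row))).flatMap
          (fun c => l.filter (fun x => rowAut x == c)) = grp l := by
  intro l
  induction hn : l.length using Nat.strong_induction_on generalizing l with
  | _ n ih =>
  cases l with
  | nil => simp [grp, PySem.List.dedup]
  | cons r t =>
    simp only [List.map_cons]
    rw [show PySem.List.dedup (rowAut r :: t.map (fun row => rowAut row))
        = PySem.Set.ofList (rowAut r :: t.map (fun row => rowAut row)) from rfl]
    rw [PySem.Set.ofList_cons, discard_ofList]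
    have hfm : (t.map (fun row => rowAut row)).filter (fun c => !(c == rowAut r))
        = (t.filter (fun x => !(rowAut x == rowAut r))).map (fun row => rowAut row) := by
      rw [List.filter_map]
      rfl
    rw [hfm]
    rw [List.flatMap_cons]
    have hcong : (PySem.Set.ofList ((t.filter (fun x => !(rowAut x == rowAut r))).map
            (fun row => rowAut row))).flatMap
          (fun c => (r :: t).filter (fun x => rowAut x == c))
        = (PySem.Set.ofList ((t.filter (fun x => !(rowAut x == rowAut r))).map
            (fun row => rowAut row))).flatMap
          (fun c => (t.filter (fun x => !(rowAut x == rowAut r))).filter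
            (fun x => rowAut x == c)) := by
      apply List.flatMap_congr
      intro c hc
      have hcmem : c ∈ (t.filter (fun x => !(rowAut x == rowAut r))).map
          (fun row => rowAut row) := (PySem.List.mem_dedup _ _).mp hc
      obtain ⟨x0, hx0, rfl⟩ := List.mem_map.mp hcmem
      have hne : rowAut x0 ≠ rowAut r := by
        have := (List.mem_filter.mp hx0).2
        simpa using this
      rw [List.filter_cons]
      have hrc : (rowAut r == rowAut x0) = false := by
        rw [beq_eq_false_iff_ne]
        exact fun h => hne h.symm
      simp only [hrc, Bool.false_eq_true, if_false]
      rw [List.filter_filter]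
      apply List.filter_congr
      intro z _
      cases hz : rowAut z == rowAut x0
      · simp
      · have : (rowAut z == rowAut r) = false := by
          rw [beq_eq_false_iff_ne, eq_of_beq hz]
          exact hne
        simp [this]
    rw [hcong]
    have hlen : (t.filter (fun x => !(rowAut x == rowAut r))).length < n := by
      subst hn
      simp only [List.length_cons]
      exact Nat.lt_succ_of_le (List.length_filter_le _ _)
    rw [show PySem.Set.ofList ((t.filter (fun x => !(rowAut x == rowAut r))).map
          (fun row => rowAut row))
        = PySem.List.dedup ((t.filter (fun x => !(rowAut x == rowAut r))).map
          (fun row => rowAut row)) from rfl]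
    rw [ih _ hlen _ rfl]
    rw [grp]

lemma B_eq_grp (allbook : List (List String)) : sameAutSort_alt allbook = grp allbook := by
  show ((allbook.foldl (fun d row => d.modify (rowAut row) []
      (fun g => g ++ [row])) PySem.Dict.empty).values).flatten = grp allbook
  set d := allbook.foldl (fun d row => d.modify (rowAut row) [] (fun g => g ++ [row]))
    PySem.Dict.empty with hd
  have hnd : d.keys.Nodup := by
    rw [hd]
    exact PySem.Dict.nodup_keys_foldl_modify_key allbook (fun row => rowAut row) []
      (fun d row => fun g => g ++ [row]) PySem.Dict.empty (by simp [PySem.Dict.keys_empty])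
  have hkeys : d.keys = PySem.List.dedup (allbook.map (fun row => rowAut row)) := by
    rw [hd]
    rw [PySem.Dict.keys_foldl_modify_key allbook (fun row => rowAut row) []
      (fun d row => fun g => g ++ [row]) PySem.Dict.empty]
    have hu : PySem.Set.update ([] : List String) (allbook.map (fun row => rowAut row))
        = PySem.Set.ofList (allbook.map (fun row => rowAut row)) :=
      PySem.Set.update_empty _
    rw [show PySem.Dict.empty.keys = ([] : List String) from rfl, hu]
    rfl
  have hget : ∀ c : String, d.getD c [] = allbook.filter (fun x => rowAut x == c) := by
    intro c
    rw [hd]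
    rw [show allbook.foldl (fun d row => d.modify (rowAut row) [] (fun g => g ++ [row]))
          PySem.Dict.empty
        = (allbook.map (fun r => (rowAut r, r))).foldl
            (fun d p => d.modify p.1 [] (fun g => g ++ [p.2])) PySem.Dict.empty from by
      rw [List.foldl_map]]
    rw [PySem.Dict.getD_foldl_modify_append]
    rw [List.filter_map]
    simp [PySem.Dict.getD_empty, Function.comp_def, List.map_map]
  have hitems := PySem.Dict.items_eq_map_keys d hnd []
  have hvals : d.values = d.keys.map (fun k => d.getD k []) := by
    rw [show d.values = d.items.map (fun p => p.2) from rfl, hitems, List.map_map]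
    rfl
  rw [hvals, hkeys]
  rw [show ((PySem.List.dedup (allbook.map (fun row => rowAut row))).map
        (fun k => d.getD k [])).flatten
      = (PySem.List.dedup (allbook.map (fun row => rowAut row))).flatMap
        (fun k => d.getD k []) from List.flatMap_def.symm]
  rw [show (PySem.List.dedup (allbook.map (fun row => rowAut row))).flatMap
        (fun k => d.getD k [])
      = (PySem.List.dedup (allbook.map (fun row => rowAut row))).flatMap
        (fun k => allbook.filter (fun x => rowAut x == k)) from
    List.flatMap_congr (fun c _ => hget c)]
  exact flatMap_dedup_grp allbook

-- ===== VERDICT (by name: the statement is the Claim_ definition above) =====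
theorem sameAutSort_spec : Claim_equal_sameAutSort := by
  intro allbook _ _
  unfold Spec_sameAutSort
  rw [A_eq_grp, B_eq_grp]
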